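-- pv_equiv track=rewrite | github.com/sercxanto/logseq_to_obsidian | src/logseq_to_obsidian/transformer.py | _indent_width
-- ===== SOURCE A (Python) =====
-- def _indent_width(line: str) -> tuple[int, int]:
--     """Return (visual_indent_width, index_after_indent) counting tabs as 4 spaces."""
--     width = 0
--     i = 0
--     while i < len(line) and line[i] in (" ", "\t"):
--         if line[i] == " ":
--             width += 1
--         else:  # tab
--             width += 4
--         i += 1
--     return width, i
-- ===== SOURCE B (Python) =====
-- def _indent_width(line: str) -> tuple[int, int]:
--     """Return (visual_indent_width, index_after_indent) counting tabs as 4 spaces."""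
--     stripped = line.lstrip(" \t")
--     i = len(line) - len(stripped)
--     prefix = line[:i]
--     return prefix.count(" ") + 4 * prefix.count("\t"), i
-- ===== Notes on version B (the rewrite author's own statement) =====
-- stated objective: simpler
-- what changed: Replaces the accumulating per-character while loop with a boundary-then-count decomposition: a left-strip of spaces and tabs finds the indent boundary, then two counting passes over the prefix derive the visual width.
import Mathlib
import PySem

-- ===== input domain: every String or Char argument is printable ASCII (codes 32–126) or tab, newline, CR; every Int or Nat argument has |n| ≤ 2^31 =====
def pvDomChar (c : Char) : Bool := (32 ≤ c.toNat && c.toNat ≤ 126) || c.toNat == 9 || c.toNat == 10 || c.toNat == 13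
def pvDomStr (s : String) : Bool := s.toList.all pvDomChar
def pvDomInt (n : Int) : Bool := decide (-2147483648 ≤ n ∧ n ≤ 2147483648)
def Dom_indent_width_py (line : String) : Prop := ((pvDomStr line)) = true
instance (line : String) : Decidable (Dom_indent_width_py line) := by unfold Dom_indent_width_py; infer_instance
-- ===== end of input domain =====

-- B replaces A's accumulating per-character while loop with a boundary-then-count
-- decomposition (lstrip to find the indent boundary, counting passes for the width); simpler.

-- ===== PORT A =====
-- A's while loop: scan characters, adding 1 per space and 4 per tab, stopping at the
-- first character that is neither; carries (width, i) exactly as the Python loop does.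
def indentWidthGo : List Char → Int → Int → Int × Int
  | [], width, i => (width, i)
  | c :: rest, width, i =>
      if c == ' ' ∨ c == '\t' then
        if c == ' ' then indentWidthGo rest (width + 1) (i + 1)
        else indentWidthGo rest (width + 4) (i + 1)
      else (width, i)

def indent_width_py (line : String) : Int × Int :=
  indentWidthGo line.toList 0 0

-- ===== PORT B =====
-- Source B: stripped = line.lstrip of spaces and tabs (ported as dropWhile of the two chars),
-- i = len(line) - len(stripped), prefix = line[:i], width = prefix.count(" ") + 4*prefix.count("\t").
def indent_width_py_alt (line : String) : Int × Int :=
  let cs := line.toList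
  let stripped := cs.dropWhile (fun c => c == ' ' || c == '\t')
  let i := cs.length - stripped.length
  let pref := cs.take i
  ((pref.count ' ' : Int) + 4 * (pref.count '\t' : Int), (i : Int))

-- ===== PRECONDITION & SPEC =====
def Spec_indent_width_py (line : String) (out : Int × Int) : Prop := out = indent_width_py_alt line
instance (line : String) (out : Int × Int) : Decidable (Spec_indent_width_py line out) := by unfold Spec_indent_width_py; infer_instance

-- ===== CLAIM (what is proved, stated in full; the proofs are below) =====
def Claim_equal_indent_width_py : Prop := ∀ (line : String), Dom_indent_width_py line → Spec_indent_width_py line (indent_width_py line)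

-- ===== LEMMAS AND PROOFS =====

-- A's loop, characterised via the takeWhile prefix of the indent characters.
theorem indentWidthGo_eq (cs : List Char) (w i : Int) :
    indentWidthGo cs w i =
      (w + ((cs.takeWhile (fun c => c == ' ' || c == '\t')).count ' ' : Int)
         + 4 * ((cs.takeWhile (fun c => c == ' ' || c == '\t')).count '\t' : Int),
       i + ((cs.takeWhile (fun c => c == ' ' || c == '\t')).length : Int)) := by
  induction cs generalizing w i with
  | nil => simp [indentWidthGo]
  | cons c rest ih =>
    by_cases hs : c = ' '
    · subst hs
      simp [indentWidthGo, ih]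
      constructor <;> ring
    · by_cases ht : c = '\t'
      · subst ht
        simp [indentWidthGo, ih]
        constructor <;> ring
      · simp [indentWidthGo, hs, ht]

-- ===== VERDICT (by name: the statement is the Claim_ definition above) =====
theorem indent_width_py_spec : Claim_equal_indent_width_py := by
  intro line _
  unfold Spec_indent_width_py indent_width_py indent_width_py_alt
  rw [indentWidthGo_eq]
  have hsplit := List.takeWhile_append_dropWhile (p := fun c => c == ' ' || c == '\t') (l := line.toList)
  have hlen : line.toList.length - (line.toList.dropWhile (fun c => c == ' ' || c == '\t')).length
      = (line.toList.takeWhile (fun c => c == ' ' || c == '\t')).length := by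
    have h2 := congrArg List.length hsplit
    simp only [List.length_append] at h2
    omega
  have htake : line.toList.take (line.toList.takeWhile (fun c => c == ' ' || c == '\t')).length
      = line.toList.takeWhile (fun c => c == ' ' || c == '\t') := by
    exact (List.prefix_iff_eq_take.mp (List.takeWhile_prefix _)).symm
  simp only [hlen, htake]
  simp
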